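-- pv_equiv track=rewrite | github.com/gomesgroup/PRISM | gt4sd_hte_integration/rt_adapter_train_v4.py | build_id_vocabs
-- ===== SOURCE A (Python) =====
-- from typing import List, Tuple, Dict, cast
--
-- def parse_acid_amine(text: str) -> Tuple[str, str]:
--     # Format: ... | <acid>.<amine>>*
--     try:
--         rhs = text.split("|", 1)[1].strip()
--         left = rhs.split(">>", 1)[0]
--         parts = left.split(".")
--         acid = parts[0].strip()
--         amine = parts[1].strip() if len(parts) > 1 else ""
--         return acid, amine
--     except Exception:
--         return "", ""
--
-- def build_id_vocabs(lines: List[str]) -> Tuple[Dict[str,int], Dict[str,int]]: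
--     acids, amines = {}, {}
--     for line in lines:
--         a, m = parse_acid_amine(line)
--         if a and a not in acids:
--             acids[a] = len(acids)
--         if m and m not in amines:
--             amines[m] = len(amines)
--     return acids, amines
-- ===== SOURCE B (Python) =====
-- from typing import List, Tuple, Dict
--
-- def parse_acid_amine(text: str) -> Tuple[str, str]:
--     # Format: ... | <acid>.<amine>>*
--     try:
--         rhs = text.split("|", 1)[1].strip()
--         left = rhs.split(">>", 1)[0]
--         parts = left.split(".")
--         acid = parts[0].strip()
--         amine = parts[1].strip() if len(parts) > 1 else ""
--         return acid, amine
--     except Exception: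
--         return "", ""
--
-- def _index_vocab(names):
--     return {name: i for i, name in enumerate(dict.fromkeys(n for n in names if n))}
--
-- def build_id_vocabs(lines: List[str]) -> Tuple[Dict[str, int], Dict[str, int]]:
--     pairs = [parse_acid_amine(line) for line in lines]
--     acids = _index_vocab(a for a, _ in pairs)
--     amines = _index_vocab(m for _, m in pairs)
--     return acids, amines
-- ===== Notes on version B (the rewrite author's own statement) =====
-- stated objective: simpler
-- what changed: replaces the interleaved membership-test-and-insert loop over two dicts by one parse pass followed by two independent dedup-and-enumerate passes (dict.fromkeys + enumerate)
import Mathlib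
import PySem

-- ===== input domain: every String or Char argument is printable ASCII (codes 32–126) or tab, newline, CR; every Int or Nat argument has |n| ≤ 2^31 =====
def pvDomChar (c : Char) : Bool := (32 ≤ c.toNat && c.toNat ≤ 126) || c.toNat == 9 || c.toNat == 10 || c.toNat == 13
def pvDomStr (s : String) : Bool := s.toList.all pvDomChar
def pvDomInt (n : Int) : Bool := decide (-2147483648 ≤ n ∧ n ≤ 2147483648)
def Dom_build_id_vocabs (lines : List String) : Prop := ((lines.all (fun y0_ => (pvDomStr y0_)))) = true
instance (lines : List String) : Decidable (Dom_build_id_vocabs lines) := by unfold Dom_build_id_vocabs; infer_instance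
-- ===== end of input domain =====

-- B replaces A's interleaved membership-test-and-insert loop over two dicts by one parse pass
-- followed by two independent order-preserving dedup-and-enumerate passes (simpler decomposition).


-- ===== PORT A =====
-- shared helper: parse_acid_amine (identical in Source A and Source B)
def parseAcidAmine (text : String) : String × String :=
  -- text.split("|", 1): sep ≠ "" so splitMax? never returns none (.getD [] is a totality guard)
  let pieces := (PySem.Str.splitMax? text "|" 1).getD []
  match pieces[1]? with
  | none => ("", "")          -- Python: IndexError from [1], caught by 'except Exception'
  | some r =>
    let rhs := PySem.Str.strip r
    -- rhs.split(">>", 1)[0]: a split result is never empty, headD "" is a totality guard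
    let left := ((PySem.Str.splitMax? rhs ">>" 1).getD []).headD ""
    let parts := (PySem.Str.split? left ".").getD []
    let acid := PySem.Str.strip (parts.headD "")
    let amine := match parts[1]? with
      | some p => PySem.Str.strip p
      | none => ""
    (acid, amine)

-- one dict update of A's loop body: 'if x and x not in d: d[x] = len(d)'
def vocabStep (d : List (String × Int)) (x : String) : List (String × Int) :=
  if x ≠ "" ∧ x ∉ d.map Prod.fst then d ++ [(x, (d.length : Int))] else d

def build_id_vocabs (lines : List String) : (List (String × Int)) × (List (String × Int)) :=
  lines.foldl (fun st line =>
    let am := parseAcidAmine line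
    (vocabStep st.1 am.1, vocabStep st.2 am.2)) ([], [])

-- ===== PORT B =====
-- _index_vocab: enumerate(dict.fromkeys(n for n in names if n)) as {name: i}
def indexVocab (names : List String) : List (String × Int) :=
  (PySem.List.enumerate (PySem.List.dedup (names.filter (fun s => s != "")))).map
    (fun p => (p.2, p.1))

def build_id_vocabs_alt (lines : List String) : (List (String × Int)) × (List (String × Int)) :=
  let pairs := lines.map parseAcidAmine
  (indexVocab (pairs.map Prod.fst), indexVocab (pairs.map Prod.snd))

-- ===== PRECONDITION & SPEC =====
def Spec_build_id_vocabs (lines : List String) (out : (List (String × Int)) × (List (String × Int))) : Prop := out = build_id_vocabs_alt lines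
instance (lines : List String) (out : (List (String × Int)) × (List (String × Int))) : Decidable (Spec_build_id_vocabs lines out) := by unfold Spec_build_id_vocabs; infer_instance

-- ===== CLAIM (what is proved, stated in full; the proofs are below) =====
def Claim_equal_build_id_vocabs : Prop := ∀ (lines : List String), Dom_build_id_vocabs lines → Spec_build_id_vocabs lines (build_id_vocabs lines)

-- ===== LEMMAS AND PROOFS =====

-- the assoc list A's loop maintains, as a function of the key list seen so far
def toDict (s : List String) : List (String × Int) :=
  (PySem.List.enumerate s).map (fun p => (p.2, p.1))

-- the key-list shadow of one vocabStep
def keyStep (s : List String) (x : String) : List String :=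
  if (x != "") = true then PySem.Set.add s x else s

theorem toDict_map_fst (s : List String) : (toDict s).map Prod.fst = s := by
  simp [toDict, List.map_map, Function.comp_def, PySem.List.map_snd_enumerate]

theorem toDict_length (s : List String) : (toDict s).length = s.length := by
  simp [toDict, PySem.List.length_enumerate]

theorem toDict_append (s : List String) (x : String) :
    toDict (s ++ [x]) = toDict s ++ [(x, (s.length : Int))] := by
  simp [toDict, PySem.List.enumerate_append, PySem.List.enumerate_cons,
    PySem.List.enumerate_nil]

theorem vocabStep_toDict (s : List String) (x : String) :
    vocabStep (toDict s) x = toDict (keyStep s x) := by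
  by_cases hx : x = ""
  · simp [vocabStep, keyStep, hx]
  · by_cases hm : x ∈ s
    · simp [vocabStep, keyStep, hx, toDict_map_fst, hm, PySem.Set.add, PySem.Set.contains]
    · simp [vocabStep, keyStep, hx, toDict_map_fst, hm, PySem.Set.add, PySem.Set.contains,
        toDict_append, toDict_length]

theorem foldl_vocabStep_toDict (xs : List String) (s : List String) :
    xs.foldl vocabStep (toDict s) = toDict (xs.foldl keyStep s) := by
  induction xs generalizing s with
  | nil => rfl
  | cons x xs ih => simp only [List.foldl_cons, vocabStep_toDict, ih]

theorem foldl_keyStep_eq_dedup (xs : List String) :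
    xs.foldl keyStep [] = PySem.List.dedup (xs.filter (fun s => s != "")) := by
  unfold keyStep
  rw [PySem.List.foldl_if_eq_foldl_filter (fun x => x != "") PySem.Set.add xs []]
  rw [PySem.List.dedup_eq_ofList, PySem.Set.ofList_eq_foldl]

theorem foldl_vocabStep_eq_indexVocab (xs : List String) :
    xs.foldl vocabStep [] = indexVocab xs := by
  have h0 : ([] : List (String × Int)) = toDict [] := rfl
  rw [h0, foldl_vocabStep_toDict, foldl_keyStep_eq_dedup]
  rfl

-- ===== VERDICT (by name: the statement is the Claim_ definition above) =====
theorem build_id_vocabs_spec : Claim_equal_build_id_vocabs := by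
  intro lines _
  unfold Spec_build_id_vocabs build_id_vocabs build_id_vocabs_alt
  rw [PySem.List.foldl_prod_mk
      (f := fun d line => vocabStep d (parseAcidAmine line).1)
      (g := fun d line => vocabStep d (parseAcidAmine line).2)]
  have hf : lines.foldl (fun d line => vocabStep d (parseAcidAmine line).1) [] =
      ((lines.map parseAcidAmine).map Prod.fst).foldl vocabStep [] := by
    rw [List.map_map, List.foldl_map]; rfl
  have hg : lines.foldl (fun d line => vocabStep d (parseAcidAmine line).2) [] =
      ((lines.map parseAcidAmine).map Prod.snd).foldl vocabStep [] := by
    rw [List.map_map, List.foldl_map]; rfl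
  rw [hf, hg, foldl_vocabStep_eq_indexVocab, foldl_vocabStep_eq_indexVocab]
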